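-- pv_equiv track=rewrite | github.com/davide3011/BitcoinMiningLab | StratumV1/test/utils.py | target_to_nbits
-- ===== SOURCE A (Python) =====
-- def target_to_nbits(target_hex):
--     """Converte un target esadecimale in formato nbits compatto."""
--     target_int = int(target_hex, 16)
--     if target_int == 0:
--         return "00000000"
--
--     # Trova il numero di byte necessari
--     target_bytes = target_int.to_bytes(32, 'big')
--     # Rimuove i byte zero iniziali
--     while len(target_bytes) > 1 and target_bytes[0] == 0:
--         target_bytes = target_bytes[1:]
--
--     # Se il primo byte ha il bit più significativo impostato, aggiungi un byte zero
--     if target_bytes[0] & 0x80: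
--         target_bytes = b'\x00' + target_bytes
--
--     # Prendi solo i primi 3 byte per il significand
--     if len(target_bytes) > 3:
--         significand = int.from_bytes(target_bytes[:3], 'big')
--         exponent = len(target_bytes)
--     else:
--         significand = int.from_bytes(target_bytes, 'big')
--         exponent = len(target_bytes)
--
--     # Costruisci nbits: exponent (1 byte) + significand (3 byte)
--     nbits = (exponent << 24) | significand
--     return format(nbits, "08x")
-- ===== SOURCE B (Python) =====
-- def target_to_nbits(target_hex):
--     """Converte un target esadecimale in formato nbits compatto."""
--     target_int = int(target_hex, 16)
--     if target_int == 0: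
--         return "00000000"
--     nbytes = (target_int.bit_length() + 7) // 8
--     if (target_int >> (8 * (nbytes - 1))) & 0x80:
--         exponent = nbytes + 1
--         significand = target_int if nbytes <= 2 else target_int >> (8 * (nbytes - 2))
--     else:
--         exponent = nbytes
--         significand = target_int if nbytes <= 3 else target_int >> (8 * (nbytes - 3))
--     return format((exponent << 24) | significand, "08x")
-- ===== Notes on version B (the rewrite author's own statement) =====
-- stated objective: simpler
-- what changed: B replaces A's fixed 32-byte buffer, leading-zero stripping loop and byte-slice reassembly by direct integer arithmetic on bit_length (shifts and masks), keeping A's right-aligned significand for values of at most 3 bytes.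
import Mathlib
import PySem

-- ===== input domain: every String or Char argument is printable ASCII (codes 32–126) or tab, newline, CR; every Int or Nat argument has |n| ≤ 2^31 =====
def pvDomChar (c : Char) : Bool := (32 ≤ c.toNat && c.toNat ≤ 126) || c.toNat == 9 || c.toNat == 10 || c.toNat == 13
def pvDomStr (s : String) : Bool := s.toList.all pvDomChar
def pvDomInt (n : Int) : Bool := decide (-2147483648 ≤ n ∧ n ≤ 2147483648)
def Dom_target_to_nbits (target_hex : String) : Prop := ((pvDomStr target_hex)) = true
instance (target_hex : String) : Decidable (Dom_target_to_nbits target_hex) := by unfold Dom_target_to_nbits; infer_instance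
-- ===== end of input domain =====

-- B replaces A's fixed 32-byte buffer and leading-zero stripping loop by direct
-- integer bit arithmetic on bit_length; objective: simpler (and no 32-byte detour).

-- ===== PORT A =====
-- shared helper: format(n, "08x") for a nonnegative integer (hand port, exact there)
def pvHex08 (n : Nat) : String :=
  let ds := Nat.toDigits 16 n
  String.ofList (List.replicate (8 - ds.length) '0' ++ ds)

-- hand port of m.to_bytes(k) most-significant byte first (list of byte values, most significant first; exact for m < 2^(8k))
def pvBytesBE : Nat → Nat → List Nat
  | _, 0 => []
  | m, k + 1 => (m / 2 ^ (8 * k) % 256) :: pvBytesBE m k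

-- A's while-loop: drop leading zero bytes while more than one byte remains
def pvStrip : List Nat → List Nat
  | 0 :: b :: rest => pvStrip (b :: rest)
  | l => l

-- hand port of int.from_bytes(l), most-significant byte first
def pvFromBytes (acc : Nat) : List Nat → Nat
  | [] => acc
  | b :: rest => pvFromBytes (acc * 256 + b) rest

-- step: prepend a zero byte when the top byte has its high bit set
def pvSign (tb1 : List Nat) : List Nat := if tb1.headD 0 &&& 128 ≠ 0 then 0 :: tb1 else tb1

-- step: significand from (at most) the first 3 bytes, exponent = byte count, then format
def pvEncode (tb2 : List Nat) : String :=
  if tb2.length > 3 then pvHex08 ((tb2.length <<< 24) ||| pvFromBytes 0 (tb2.take 3))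
  else pvHex08 ((tb2.length <<< 24) ||| pvFromBytes 0 tb2)

def pvCoreA (m : Nat) : String := pvEncode (pvSign (pvStrip (pvBytesBE m 32)))

def target_to_nbits (target_hex : String) : String :=
  match PySem.Int.ofStrBase? target_hex 16 with
  | none => ""          -- int(target_hex, 16) raises ValueError (excluded by Pre_)
  | some t =>
    if t = 0 then "00000000"
    else if t < 0 ∨ 2 ^ 256 ≤ t then ""   -- to_bytes(32) raises OverflowError (excluded by Pre_)
    else pvCoreA t.toNat

-- ===== PORT B =====
def pvCompact (m nbytes : Nat) : String :=
  if (m >>> (8 * (nbytes - 1))) &&& 128 ≠ 0 then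
    pvHex08 (((nbytes + 1) <<< 24) ||| (if nbytes ≤ 2 then m else m >>> (8 * (nbytes - 2))))
  else
    pvHex08 ((nbytes <<< 24) ||| (if nbytes ≤ 3 then m else m >>> (8 * (nbytes - 3))))

-- Nat.size = Python int.bit_length on naturals
def pvCoreB (m : Nat) : String := pvCompact m ((Nat.size m + 7) / 8)

def target_to_nbits_alt (target_hex : String) : String :=
  match PySem.Int.ofStrBase? target_hex 16 with
  | none => ""          -- int(target_hex, 16) raises ValueError (excluded by Pre_)
  | some t =>
    if t = 0 then "00000000"
    else pvCoreB t.toNat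

-- ===== PRECONDITION & SPEC =====
-- Pre_ excludes exactly the inputs where A raises: non-hex strings (ValueError from int)
-- and values that are negative or ≥ 2^256 (OverflowError from to_bytes(32)).
def Pre_target_to_nbits (target_hex : String) : Prop :=
  (match PySem.Int.ofStrBase? target_hex 16 with
   | none => false
   | some t => decide (0 ≤ t ∧ t < 2 ^ 256)) = true
instance (target_hex : String) : Decidable (Pre_target_to_nbits target_hex) := by
  unfold Pre_target_to_nbits; infer_instance

def pvWitness_target_to_nbits : String := "1d00ffff"

def Spec_target_to_nbits (target_hex : String) (out : String) : Prop := out = target_to_nbits_alt target_hex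
instance (target_hex : String) (out : String) : Decidable (Spec_target_to_nbits target_hex out) := by unfold Spec_target_to_nbits; infer_instance

-- ===== CLAIM (what is proved, stated in full; the proofs are below) =====
def Claim_equal_target_to_nbits : Prop := ∀ (target_hex : String), Dom_target_to_nbits target_hex → Pre_target_to_nbits target_hex → Spec_target_to_nbits target_hex (target_to_nbits target_hex)

-- ===== LEMMAS AND PROOFS =====

theorem pvBytesBE_length (m k : Nat) : (pvBytesBE m k).length = k := by
  induction k with
  | zero => rfl
  | succ k ih => simp [pvBytesBE, ih]

theorem pvStrip_cons_ne {h : Nat} (l : List Nat) (hh : h ≠ 0) :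
    pvStrip (h :: l) = h :: l := by
  cases l with
  | nil => cases h with | zero => exact absurd rfl hh | succ n => rfl
  | cons b rest => cases h with | zero => exact absurd rfl hh | succ n => rfl

theorem pvStrip_zero_cons (b : Nat) (rest : List Nat) :
    pvStrip (0 :: b :: rest) = pvStrip (b :: rest) := rfl

-- stripping ignores zero padding above the significant k bytes
theorem pvStrip_pad (m k j : Nat) (hk : 1 ≤ k) (hm : m < 2 ^ (8 * k)) :
    pvStrip (pvBytesBE m (k + j)) = pvStrip (pvBytesBE m k) := by
  induction j with
  | zero => rfl
  | succ j ih =>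
    have hz : m / 2 ^ (8 * (k + j)) % 256 = 0 := by
      have : m < 2 ^ (8 * (k + j)) :=
        lt_of_lt_of_le hm (Nat.pow_le_pow_right (by norm_num) (by omega))
      simp [Nat.div_eq_of_lt this]
    have hcons : ∃ b rest, pvBytesBE m (k + j) = b :: rest := by
      cases hkj : pvBytesBE m (k + j) with
      | nil => have := pvBytesBE_length m (k + j); rw [hkj] at this; simp at this; omega
      | cons b rest => exact ⟨b, rest, rfl⟩
    obtain ⟨b, rest, hbr⟩ := hcons
    have : pvBytesBE m (k + (j + 1)) = 0 :: b :: rest := by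
      show pvBytesBE m ((k + j) + 1) = _
      rw [show pvBytesBE m ((k + j) + 1) = (m / 2 ^ (8 * (k + j)) % 256) :: pvBytesBE m (k + j) from rfl,
        hz, hbr]
    rw [this, pvStrip_zero_cons, ← hbr, ih]

theorem pvStrip_exact (m k : Nat) (hk : 1 ≤ k) (hlo : 2 ^ (8 * (k - 1)) ≤ m)
    (hhi : m < 2 ^ (8 * k)) :
    pvStrip (pvBytesBE m k) = pvBytesBE m k := by
  obtain ⟨k', rfl⟩ : ∃ k', k = k' + 1 := ⟨k - 1, by omega⟩
  have hk' : 8 * (k' + 1 - 1) = 8 * k' := by omega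
  rw [hk'] at hlo
  have hdiv : 1 ≤ m / 2 ^ (8 * k') := (Nat.one_le_div_iff (Nat.pow_pos (by norm_num : (0:Nat) < 2))).2 hlo
  have hpow : (2 : Nat) ^ (8 * (k' + 1)) = 256 * 2 ^ (8 * k') := by
    rw [show 8 * (k' + 1) = 8 * k' + 8 by ring, pow_add]; ring
  have hdlt : m / 2 ^ (8 * k') < 256 :=
    (Nat.div_lt_iff_lt_mul (Nat.pow_pos (by norm_num : (0:Nat) < 2))).2 (hpow ▸ hhi)
  have hne : m / 2 ^ (8 * k') % 256 ≠ 0 := by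
    rw [Nat.mod_eq_of_lt hdlt]; omega
  exact pvStrip_cons_ne _ hne

theorem pvFromBytes_cons (acc b : Nat) (l : List Nat) :
    pvFromBytes acc (b :: l) = pvFromBytes (acc * 256 + b) l := rfl

theorem pvFromBytes_bytesBE (m : Nat) : ∀ (k acc : Nat),
    pvFromBytes acc (pvBytesBE m k) = acc * 2 ^ (8 * k) + m % 2 ^ (8 * k) := by
  intro k
  induction k with
  | zero => intro acc; simp [pvBytesBE, pvFromBytes, Nat.mod_one]
  | succ k ih =>
    intro acc
    show pvFromBytes (acc * 256 + m / 2 ^ (8 * k) % 256) (pvBytesBE m k) = _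
    rw [ih]
    have hsplit : m % 2 ^ (8 * (k + 1)) = m % 2 ^ (8 * k) + 2 ^ (8 * k) * (m / 2 ^ (8 * k) % 256) := by
      have : (2 : Nat) ^ (8 * (k + 1)) = 2 ^ (8 * k) * 256 := by
        rw [show 8 * (k + 1) = 8 * k + 8 by ring, pow_add]; norm_num
      rw [this, Nat.mod_mul]
    rw [hsplit, show 8 * (k + 1) = 8 * k + 8 by ring, pow_add]
    ring

theorem pvBytesBE_take (m : Nat) : ∀ (j k : Nat), j ≤ k →
    (pvBytesBE m k).take j = pvBytesBE (m / 2 ^ (8 * (k - j))) j := by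
  intro j
  induction j with
  | zero => intro k _; simp [pvBytesBE]
  | succ j ih =>
    intro k hjk
    obtain ⟨k', rfl⟩ : ∃ k', k = k' + 1 := ⟨k - 1, by omega⟩
    have hjk' : j ≤ k' := by omega
    show (m / 2 ^ (8 * k') % 256) :: (pvBytesBE m k').take j = _
    rw [ih k' hjk']
    have hkd : k' + 1 - (j + 1) = k' - j := by omega
    rw [hkd]
    show _ = (m / 2 ^ (8 * (k' - j)) / 2 ^ (8 * j) % 256) :: pvBytesBE (m / 2 ^ (8 * (k' - j))) j
    congr 1
    rw [Nat.div_div_eq_div_mul, ← pow_add]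
    have he : 8 * (k' - j) + 8 * j = 8 * k' := by omega
    rw [he]
  
theorem pvCore_eq (m : Nat) (h1 : 1 ≤ m) (h2 : m < 2 ^ 256) : pvCoreA m = pvCoreB m := by
  obtain ⟨s, hs⟩ : ∃ s, Nat.size m = s := ⟨_, rfl⟩
  obtain ⟨k, hkdef⟩ : ∃ k, (s + 7) / 8 = k := ⟨_, rfl⟩
  have hms : m < 2 ^ s := hs ▸ Nat.lt_size_self m
  have hs1 : 1 ≤ s := by
    by_contra h
    have : s = 0 := by omega
    rw [this] at hms; omega
  have hlo : 2 ^ (s - 1) ≤ m := Nat.lt_size.mp (by rw [hs]; omega)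
  have hs256 : s ≤ 256 := hs ▸ Nat.size_le.mpr h2
  have hk1 : 1 ≤ k := by omega
  have hk32 : k ≤ 32 := by omega
  have hklo : 2 ^ (8 * (k - 1)) ≤ m :=
    le_trans (Nat.pow_le_pow_right (by norm_num) (by omega)) hlo
  have hkhi : m < 2 ^ (8 * k) :=
    lt_of_lt_of_le hms (Nat.pow_le_pow_right (by norm_num) (by omega))
  -- the stripped byte list is the k-byte representation
  have hstrip : pvStrip (pvBytesBE m 32) = pvBytesBE m k := by
    have := pvStrip_pad m k (32 - k) hk1 hkhi
    rw [show k + (32 - k) = 32 by omega] at this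
    rw [this, pvStrip_exact m k hk1 hklo hkhi]
  -- top byte
  obtain ⟨k', rfl⟩ : ∃ k', k = k' + 1 := ⟨k - 1, by omega⟩
  have hpow : (2 : Nat) ^ (8 * (k' + 1)) = 256 * 2 ^ (8 * k') := by
    rw [show 8 * (k' + 1) = 8 * k' + 8 by ring, pow_add]; ring
  have htop' : m / 2 ^ (8 * k') < 256 :=
    (Nat.div_lt_iff_lt_mul (Nat.pow_pos (by norm_num : (0:Nat) < 2))).2 (hpow ▸ hkhi)
  have hhead : (pvBytesBE m (k' + 1)).headD 0 = m >>> (8 * ((k' + 1) - 1)) := by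
    show m / 2 ^ (8 * k') % 256 = _
    rw [Nat.mod_eq_of_lt htop', Nat.shiftRight_eq_div_pow]
    norm_num
  unfold pvCoreA pvCoreB pvSign pvEncode pvCompact
  rw [hs, hkdef, hstrip, hhead]
  by_cases hbit : m >>> (8 * (k' + 1 - 1)) &&& 128 ≠ 0
  · -- high-bit case: a zero byte is prepended; exponent = k + 1
    rw [if_pos hbit, if_pos hbit]
    simp only [List.length_cons, pvBytesBE_length]
    by_cases hk3 : k' + 1 + 1 > 3
    · -- k ≥ 3: significand from the first 3 bytes of 0 :: bytes
      have hk'3 : 2 ≤ k' + 1 := by omega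
      have htake : (0 :: pvBytesBE m (k' + 1)).take 3
          = 0 :: pvBytesBE (m / 2 ^ (8 * (k' + 1 - 2))) 2 := by
        show 0 :: (pvBytesBE m (k' + 1)).take 2 = _
        rw [pvBytesBE_take m 2 (k' + 1) hk'3]
      have hx : m / 2 ^ (8 * (k' + 1 - 2)) < 2 ^ 16 := by
        rw [Nat.div_lt_iff_lt_mul (Nat.pow_pos (by norm_num : (0:Nat) < 2)), ← pow_add]
        exact lt_of_lt_of_le hkhi (Nat.pow_le_pow_right (by norm_num) (by omega))
      have hfb : pvFromBytes 0 ((0 :: pvBytesBE m (k' + 1)).take 3)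
          = m >>> (8 * (k' + 1 - 2)) := by
        rw [htake, pvFromBytes_cons, pvFromBytes_bytesBE, Nat.shiftRight_eq_div_pow]
        simp only [Nat.zero_mul, Nat.zero_add]
        have hx' : m / 2 ^ (8 * (k' + 1 - 2)) < 2 ^ (8 * 2) := by norm_num at hx ⊢; exact hx
        rw [Nat.mod_eq_of_lt hx']
      rw [if_pos hk3, hfb, if_neg (by omega : ¬ (k' + 1 ≤ 2))]
    · -- k ≤ 2: the whole (k+1)-byte list, value m itself
      have hfb : pvFromBytes 0 (0 :: pvBytesBE m (k' + 1)) = m := by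
        rw [pvFromBytes_cons, pvFromBytes_bytesBE]
        simp [Nat.mod_eq_of_lt hkhi]
      rw [if_neg hk3, hfb, if_pos (by omega : k' + 1 ≤ 2)]
  · -- low-bit case: exponent = k
    rw [if_neg hbit, if_neg hbit]
    simp only [pvBytesBE_length]
    by_cases hk3 : k' + 1 > 3
    · have hk'3 : 3 ≤ k' + 1 := by omega
      have hx : m / 2 ^ (8 * (k' + 1 - 3)) < 2 ^ 24 := by
        rw [Nat.div_lt_iff_lt_mul (Nat.pow_pos (by norm_num : (0:Nat) < 2)), ← pow_add]
        exact lt_of_lt_of_le hkhi (Nat.pow_le_pow_right (by norm_num) (by omega))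
      have hfb : pvFromBytes 0 ((pvBytesBE m (k' + 1)).take 3)
          = m >>> (8 * (k' + 1 - 3)) := by
        rw [pvBytesBE_take m 3 (k' + 1) hk'3, pvFromBytes_bytesBE, Nat.shiftRight_eq_div_pow]
        simp only [Nat.zero_mul, Nat.zero_add]
        have hx' : m / 2 ^ (8 * (k' + 1 - 3)) < 2 ^ (8 * 3) := by norm_num at hx ⊢; exact hx
        rw [Nat.mod_eq_of_lt hx']
      rw [if_pos hk3, hfb, if_neg (by omega : ¬ (k' + 1 ≤ 3))]
    · have hfb : pvFromBytes 0 (pvBytesBE m (k' + 1)) = m := by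
        rw [pvFromBytes_bytesBE]
        simp [Nat.mod_eq_of_lt hkhi]
      rw [if_neg hk3, hfb, if_pos (by omega : k' + 1 ≤ 3)]

-- ===== VERDICT (by name: the statement is the Claim_ definition above) =====
theorem target_to_nbits_spec : Claim_equal_target_to_nbits := by
  intro target_hex _ hpre
  unfold Spec_target_to_nbits target_to_nbits target_to_nbits_alt
  unfold Pre_target_to_nbits at hpre
  cases hconv : PySem.Int.ofStrBase? target_hex 16 with
  | none => rfl
  | some t =>
    rw [hconv] at hpre
    simp only [decide_eq_true_eq] at hpre
    obtain ⟨ht0, ht256⟩ := hpre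
    by_cases ht : t = 0
    · simp [ht]
    · have h1 : 1 ≤ t.toNat := by omega
      have h2 : t.toNat < 2 ^ 256 := by
        have : (t.toNat : Int) < 2 ^ 256 := by rw [Int.toNat_of_nonneg ht0]; exact ht256
        exact_mod_cast this
      simp only [if_neg ht, if_neg (by omega : ¬ (t < 0 ∨ 2 ^ 256 ≤ t))]
      exact pvCore_eq t.toNat h1 h2
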